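-- pv_equiv track=rewrite | github.com/t3kt/pattern-mapper-2 | lib/pm2_runtime_shared.py | _transformAttrs
-- ===== SOURCE A (Python) =====
-- def _transformAttrs(namePrefix: str, labelPrefix: str):
-- 	attrs = dict(
-- 		tx='Translate X',
-- 		tY='Translate Y',
-- 		tz='Translate Z',
-- 		rx='Rotate X',
-- 		rY='Rotate Y',
-- 		rz='Rotate Z',
-- 		sx='Scale X',
-- 		sY='Scale Y',
-- 		sz='Scale Z',
-- 		px='Pivot X',
-- 		pY='Pivot Y',
-- 		pz='Pivot Z',
-- 	)
-- 	return {
-- 		namePrefix + name: labelPrefix + label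
-- 		for name, label in attrs.items()
-- 	}
-- ===== SOURCE B (Python) =====
-- def _transformAttrs(namePrefix: str, labelPrefix: str):
-- 	out = {}
-- 	for word in ['Translate', 'Rotate', 'Scale', 'Pivot']:
-- 		kindChar = word[0].lower()
-- 		for axis in 'xYz':
-- 			out[namePrefix + kindChar + axis] = labelPrefix + word + ' ' + axis.upper()
-- 	return out
-- ===== Notes on version B (the rewrite author's own statement) =====
-- stated objective: simpler
-- what changed: Replaces the 12-entry literal table and flat comprehension with a populating nested loop over four kind words and the axis string 'xYz', deriving each key char as the word's lowercased initial and each axis label by uppercasing the axis key.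
import Mathlib
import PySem

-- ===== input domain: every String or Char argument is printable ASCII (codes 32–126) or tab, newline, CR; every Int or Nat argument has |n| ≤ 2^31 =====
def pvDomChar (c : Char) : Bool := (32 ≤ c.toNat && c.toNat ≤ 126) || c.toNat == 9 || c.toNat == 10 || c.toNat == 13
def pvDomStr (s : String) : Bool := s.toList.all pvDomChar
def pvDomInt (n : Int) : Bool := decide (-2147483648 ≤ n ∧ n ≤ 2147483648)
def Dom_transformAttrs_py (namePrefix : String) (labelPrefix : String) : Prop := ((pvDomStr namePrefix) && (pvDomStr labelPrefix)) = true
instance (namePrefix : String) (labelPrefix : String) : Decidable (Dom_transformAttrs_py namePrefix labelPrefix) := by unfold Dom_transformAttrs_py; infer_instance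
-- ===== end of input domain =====

-- B replaces A's 12-entry literal table with a populating nested loop over kind words and axis chars,
-- deriving key chars and axis labels by case conversion (objective: simpler).
-- ===== PORT A =====
-- literal transliteration of A: the fixed 12-entry dict, then a dict comprehension prefixing each pair
def transformAttrs_py (namePrefix : String) (labelPrefix : String) : List (String × String) :=
  let attrs : List (String × String) :=
    [("tx", "Translate X"), ("tY", "Translate Y"), ("tz", "Translate Z"),
     ("rx", "Rotate X"), ("rY", "Rotate Y"), ("rz", "Rotate Z"),
     ("sx", "Scale X"), ("sY", "Scale Y"), ("sz", "Scale Z"),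
     ("px", "Pivot X"), ("pY", "Pivot Y"), ("pz", "Pivot Z")]
  attrs.map (fun p => (namePrefix ++ p.1, labelPrefix ++ p.2))

-- ===== PORT B =====
-- transliteration of B's inner loop: for axis in 'xYz', append one entry to the accumulator
-- (Char.toLower/Char.toUpper agree with Python's str.lower/upper on these ASCII letters)
def tpAxisLoop (namePrefix labelPrefix : String) (word : String) (kindChar : Char)
    (axes : List Char) (acc : List (String × String)) : List (String × String) :=
  match axes with
  | [] => acc
  | axis :: rest =>
      tpAxisLoop namePrefix labelPrefix word kindChar rest
        (acc ++ [(namePrefix ++ String.singleton kindChar ++ String.singleton axis,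
                  labelPrefix ++ word ++ " " ++ String.singleton axis.toUpper)])

-- transliteration of B's outer loop: for each kind word, compute kindChar = word[0].lower(), run the axis loop
def tpWordLoop (namePrefix labelPrefix : String) (words : List String)
    (acc : List (String × String)) : List (String × String) :=
  match words with
  | [] => acc
  | word :: rest =>
      tpWordLoop namePrefix labelPrefix rest
        (tpAxisLoop namePrefix labelPrefix word (Char.toLower (word.toList.headD ' '))
          "xYz".toList acc)

def transformAttrs_py_alt (namePrefix : String) (labelPrefix : String) : List (String × String) :=
  tpWordLoop namePrefix labelPrefix ["Translate", "Rotate", "Scale", "Pivot"] []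

-- ===== PRECONDITION & SPEC =====
def Spec_transformAttrs_py (namePrefix : String) (labelPrefix : String) (out : List (String × String)) : Prop := out = transformAttrs_py_alt namePrefix labelPrefix
instance (namePrefix : String) (labelPrefix : String) (out : List (String × String)) : Decidable (Spec_transformAttrs_py namePrefix labelPrefix out) := by unfold Spec_transformAttrs_py; infer_instance

-- ===== CLAIM (what is proved, stated in full; the proofs are below) =====
def Claim_equal_transformAttrs_py : Prop := ∀ (namePrefix : String) (labelPrefix : String), Dom_transformAttrs_py namePrefix labelPrefix → Spec_transformAttrs_py namePrefix labelPrefix (transformAttrs_py namePrefix labelPrefix)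

-- ===== LEMMAS AND PROOFS =====

-- ===== VERDICT (by name: the statement is the Claim_ definition above) =====
theorem transformAttrs_py_spec : Claim_equal_transformAttrs_py := by
  intro namePrefix labelPrefix _
  unfold Spec_transformAttrs_py transformAttrs_py transformAttrs_py_alt
  simp [tpWordLoop, tpAxisLoop, String.ext_iff]
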